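-- pv_equiv track=rewrite | github.com/SuperSlowStarter/DSwithPython | 데이터구조/과제/20230582_이대건_챕터3_01.py | add_friend
-- ===== SOURCE A (Python) =====
-- def add_friend(friends_tuple, new_friend, counts):
--     # 삽입할 위치를 찾는 position을 -1로 초기화
--     position = -1
--     for i in range(len(friends_tuple)):
--         if counts >= friends_tuple[i][1]:
--             position = i #튜플의 첫 값부터 비교
--             break
--
--     # 삽입할 위치가 없으면 리스트 끝에 삽입
--     if position == -1:
--         position = len(friends_tuple)
--
--     # None을 추가하여 새로운 친구를 위한 자리 마련
--     friends_tuple.append(None)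
--
--     # position에 맞게 요소들 뒤로 이동
--     for i in range(len(friends_tuple) - 1, position, -1):
--         friends_tuple[i] = friends_tuple[i - 1]
--
--     # 새로 입력받은 친구를 position에 삽입
--     friends_tuple[position] = (new_friend, counts)
--
--     return friends_tuple
-- ===== SOURCE B (Python) =====
-- # Same result as A, built by a single forward pass that rebuilds the list with the
-- # new pair spliced in before the first entry whose count is <= counts;
-- # mutates friends_tuple in place (slice assignment) and returns it, like A.
-- def add_friend(friends_tuple, new_friend, counts):
--     out = []
--     inserted = False
--     for pair in friends_tuple:
--         if not inserted and counts >= pair[1]: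
--             out.append((new_friend, counts))
--             inserted = True
--         out.append(pair)
--     if not inserted:
--         out.append((new_friend, counts))
--     friends_tuple[:] = out
--     return friends_tuple
-- ===== Notes on version B (the rewrite author's own statement) =====
-- stated objective: simpler
-- what changed: A scans for the position by index, appends a None placeholder and shifts elements rightward with a backward index loop before overwriting the slot; B is a single forward pass with an inserted-flag that rebuilds the list with the new pair spliced in before the first entry whose count is <= counts (same in-place mutation, via slice assignment).
import Mathlib
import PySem

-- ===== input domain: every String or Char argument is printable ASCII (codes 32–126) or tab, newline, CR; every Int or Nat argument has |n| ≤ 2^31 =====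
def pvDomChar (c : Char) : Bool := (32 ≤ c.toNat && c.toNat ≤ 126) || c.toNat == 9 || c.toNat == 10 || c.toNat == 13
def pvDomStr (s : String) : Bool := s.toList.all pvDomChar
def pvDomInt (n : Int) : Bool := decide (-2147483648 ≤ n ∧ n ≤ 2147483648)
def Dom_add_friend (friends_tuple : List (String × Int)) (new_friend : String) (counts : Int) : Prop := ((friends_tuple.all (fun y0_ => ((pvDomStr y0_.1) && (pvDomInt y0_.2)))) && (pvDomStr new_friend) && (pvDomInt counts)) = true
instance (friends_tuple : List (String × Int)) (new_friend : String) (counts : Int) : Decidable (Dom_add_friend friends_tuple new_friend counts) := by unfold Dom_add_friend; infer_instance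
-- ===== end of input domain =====

-- B replaces A's position scan + append(None) + backward shift loop with a single
-- structural recursion that rebuilds the list with the new pair spliced in (simpler).
-- Both Pythons mutate friends_tuple in place to the same final contents and return it;
-- the theorems below are about the returned value.

-- ===== PORT A =====
-- 'for i in range(len(friends_tuple)): if counts >= friends_tuple[i][1]: position = i; break'
-- ported as index recursion returning the found index, or -1 (the initial value) if none.
def aFindPos (friends_tuple : List (String × Int)) (counts : Int) (i : Nat) : Int :=
  if h : i < friends_tuple.length then
    if counts ≥ (friends_tuple[i]).2 then (i : Int)
    else aFindPos friends_tuple counts (i + 1)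
  else -1
termination_by friends_tuple.length - i

def add_friend (friends_tuple : List (String × Int)) (new_friend : String) (counts : Int) : List (String × Int) :=
  let position : Int := aFindPos friends_tuple counts 0
  let position : Int := if position = -1 then (friends_tuple.length : Int) else position
  -- friends_tuple.append(None): the list temporarily holds None, modelled by Option
  let lst : List (Option (String × Int)) := friends_tuple.map some ++ [none]
  -- for i in range(len(friends_tuple) - 1, position, -1): friends_tuple[i] = friends_tuple[i - 1]
  -- (pyGetD with default none is exact here: every index read is in range)
  let lst := (PySem.List.pyRange ((lst.length : Int) - 1) position (-1)).foldl
      (fun l i => PySem.List.pySetD l i (PySem.List.pyGetD l (i - 1) none)) lst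
  -- friends_tuple[position] = (new_friend, counts)
  let lst := PySem.List.pySetD lst position (some (new_friend, counts))
  -- after the insertion every slot holds a pair; filterMap id strips the Option layer
  lst.filterMap id

-- ===== PORT B =====
def add_friend_alt (friends_tuple : List (String × Int)) (new_friend : String) (counts : Int) : List (String × Int) :=
  let s := friends_tuple.foldl
    (fun (s : List (String × Int) × Bool) pair =>
      if !s.2 && decide (counts ≥ pair.2) then (s.1 ++ [(new_friend, counts), pair], true)
      else (s.1 ++ [pair], s.2))
    ([], false)
  if !s.2 then s.1 ++ [(new_friend, counts)] else s.1

-- ===== PRECONDITION & SPEC =====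
def Spec_add_friend (friends_tuple : List (String × Int)) (new_friend : String) (counts : Int) (out : List (String × Int)) : Prop := out = add_friend_alt friends_tuple new_friend counts
instance (friends_tuple : List (String × Int)) (new_friend : String) (counts : Int) (out : List (String × Int)) : Decidable (Spec_add_friend friends_tuple new_friend counts out) := by unfold Spec_add_friend; infer_instance

-- ===== CLAIM (what is proved, stated in full; the proofs are below) =====
def Claim_equal_add_friend : Prop := ∀ (friends_tuple : List (String × Int)) (new_friend : String) (counts : Int), Dom_add_friend friends_tuple new_friend counts → Spec_add_friend friends_tuple new_friend counts (add_friend friends_tuple new_friend counts)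

-- ===== LEMMAS AND PROOFS =====

-- once the pair is inserted, B's pass just copies the rest of the list
theorem bFold_inserted (nf : String) (c : Int) (ft : List (String × Int)) :
    ∀ acc : List (String × Int),
      ft.foldl
        (fun (s : List (String × Int) × Bool) pair =>
          if !s.2 && decide (c ≥ pair.2) then (s.1 ++ [(nf, c), pair], true)
          else (s.1 ++ [pair], s.2))
        (acc, true) = (acc ++ ft, true) := by
  induction ft with
  | nil => simp
  | cons x xs ih =>
      intro acc
      rw [List.foldl_cons]
      simp only [Bool.not_true, Bool.false_and, Bool.false_eq_true, if_false]
      rw [ih]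
      simp

-- B's pass splices the new pair in at the first index whose count is ≤ counts (findIdx)
theorem bFold_eq_insertIdx (nf : String) (c : Int) (ft : List (String × Int)) :
    ∀ acc : List (String × Int),
      ft.foldl
        (fun (s : List (String × Int) × Bool) pair =>
          if !s.2 && decide (c ≥ pair.2) then (s.1 ++ [(nf, c), pair], true)
          else (s.1 ++ [pair], s.2))
        (acc, false) =
        (if ft.findIdx (fun x => decide (c ≥ x.2)) = ft.length
         then (acc ++ ft, false)
         else (acc ++ ft.take (ft.findIdx (fun x => decide (c ≥ x.2))) ++
                 (nf, c) :: ft.drop (ft.findIdx (fun x => decide (c ≥ x.2))), true)) := by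
  induction ft with
  | nil => simp
  | cons x xs ih =>
      intro acc
      by_cases h : c ≥ x.2
      · rw [List.foldl_cons]
        have hc : decide (c ≥ x.2) = true := decide_eq_true h
        simp only [Bool.not_false, Bool.true_and, hc, if_true]
        rw [bFold_inserted]
        simp [List.findIdx_cons, hc]
      · have hlen : List.findIdx (fun x => decide (c ≥ x.2)) xs ≤ xs.length :=
          List.findIdx_le_length
        simp only [List.foldl_cons, h, decide_false, Bool.and_false, Bool.false_eq_true,
          if_false, List.findIdx_cons, cond_false, ih (acc ++ [x]), List.length_cons]
        split_ifs with h1 h2 h2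
        · simp
        · omega
        · omega
        · simp

-- B computes insertion at the first index whose count is ≤ counts (findIdx).
theorem alt_eq_insertIdx (ft : List (String × Int)) (nf : String) (c : Int) :
    add_friend_alt ft nf c =
      ft.take (ft.findIdx (fun x => decide (c ≥ x.2))) ++
        (nf, c) :: ft.drop (ft.findIdx (fun x => decide (c ≥ x.2))) := by
  unfold add_friend_alt
  rw [bFold_eq_insertIdx]
  by_cases h : ft.findIdx (fun x => decide (c ≥ x.2)) = ft.length
  · simp [h, List.take_of_length_le, List.drop_of_length_le]
  · simp [h]

-- A's scan returns the first index i ≥ start with counts ≥ ft[i].2 (as Int), else -1.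
theorem aFindPos_spec (ft : List (String × Int)) (c : Int) :
    ∀ i, i ≤ ft.length →
      aFindPos ft c i =
        (if (ft.drop i).findIdx (fun x => decide (c ≥ x.2)) = (ft.drop i).length then -1
         else ((i + (ft.drop i).findIdx (fun x => decide (c ≥ x.2)) : Nat) : Int)) := by
  intro i
  induction hn : ft.length - i generalizing i with
  | zero =>
      intro hi
      have hie : i = ft.length := by omega
      rw [aFindPos]
      simp [hie]
  | succ n ih =>
      intro hi
      have hlt : i < ft.length := by omega
      have hdrop : ft.drop i = ft[i] :: ft.drop (i + 1) := List.drop_eq_getElem_cons hlt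
      rw [aFindPos, dif_pos hlt, hdrop, List.findIdx_cons]
      by_cases h : c ≥ ft[i].2
      · simp [h]
        omega
      · have hih := ih (i + 1) (by omega) (by omega)
        rw [if_neg h, hih]
        simp only [h, decide_false, cond_false, List.length_cons]
        split_ifs with h1 h2 h2 <;> first
          | rfl
          | omega

-- the backward shift loop, pointwise: it moves every slot in (k, k+n] one to the right
theorem shift_fold_getElem? (k : Nat) :
    ∀ (n : Nat) (l : List (Option (String × Int))), k + n < l.length →
      ∀ (j : Nat),
        ((PySem.List.pyRange ((k + n : Nat) : Int) (k : Int) (-1)).foldl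
            (fun l i => PySem.List.pySetD l i (PySem.List.pyGetD l (i - 1) none)) l)[j]? =
          if k < j ∧ j ≤ k + n then l[j - 1]? else l[j]? := by
  intro n
  induction n with
  | zero =>
      intro l hl j
      rw [PySem.List.pyRange_neg_one_eq_nil (by push_cast; omega)]
      simp only [List.foldl_nil]
      have : ¬ (k < j ∧ j ≤ k + 0) := by omega
      rw [if_neg this]
  | succ n ih =>
      intro l hl j
      have hcons : PySem.List.pyRange ((k + (n + 1) : Nat) : Int) (k : Int) (-1)
          = ((k + (n + 1) : Nat) : Int) :: PySem.List.pyRange ((k + n : Nat) : Int) (k : Int) (-1) := by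
        rw [PySem.List.pyRange_neg_one_cons (by push_cast; omega)]
        congr 1
        push_cast; ring
      have hsub : ((k + (n + 1) : Nat) : Int) - 1 = ((k + n : Nat) : Int) := by push_cast; ring
      rw [hcons, List.foldl_cons, hsub, PySem.List.pySetD_natCast, PySem.List.pyGetD_natCast]
      have hlen : (l.set (k + (n + 1)) (l.getD (k + n) none)).length = l.length := by
        simp
      have hih := ih (l.set (k + (n + 1)) (l.getD (k + n) none)) (by omega) j
      rw [hih]
      have hget : ∀ m : Nat, m ≠ k + (n + 1) →
          (l.set (k + (n + 1)) (l.getD (k + n) none))[m]? = l[m]? := by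
        intro m hm
        rw [List.getElem?_set_ne (by omega)]
      by_cases hj1 : k < j ∧ j ≤ k + n
      · rw [if_pos hj1, if_pos (by omega), hget (j - 1) (by omega)]
      · rw [if_neg hj1]
        by_cases hj2 : j = k + (n + 1)
        · subst hj2
          have h1 : l[k + n]? = some l[k + n] := List.getElem?_eq_getElem (by omega)
          have h2 : l.getD (k + n) none = l[k + n] := by
            rw [List.getD_eq_getElem?_getD, h1]; rfl
          have h3 : (l.set (k + (n + 1)) (l.getD (k + n) none))[k + (n + 1)]? =
              some (l.getD (k + n) none) := List.getElem?_set_self (by omega)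
          rw [if_pos (by omega), h3, h2, show k + (n + 1) - 1 = k + n by omega, h1]
        · rw [if_neg (by omega), hget j hj2]

theorem shift_fold_length (r : List Int) (l : List (Option (String × Int))) :
    (r.foldl (fun l i => PySem.List.pySetD l i (PySem.List.pyGetD l (i - 1) none)) l).length
      = l.length := by
  induction r generalizing l with
  | nil => rfl
  | cons a r ih => rw [List.foldl_cons, ih, PySem.List.length_pySetD]

-- A also computes insertion at the first index whose count is ≤ counts
theorem add_friend_eq_insertIdx (ft : List (String × Int)) (nf : String) (c : Int) :
    add_friend ft nf c =
      ft.take (ft.findIdx (fun x => decide (c ≥ x.2))) ++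
        (nf, c) :: ft.drop (ft.findIdx (fun x => decide (c ≥ x.2))) := by
  have hKle : ft.findIdx (fun x => decide (c ≥ x.2)) ≤ ft.length := List.findIdx_le_length
  set K := ft.findIdx (fun x => decide (c ≥ x.2)) with hKdef
  set n := ft.length with hn
  unfold add_friend
  have hpos0 := aFindPos_spec ft c 0 (Nat.zero_le _)
  simp only [List.drop_zero, ← hKdef, ← hn, Nat.zero_add] at hpos0
  have hpos : (if aFindPos ft c 0 = -1 then (n : Int) else aFindPos ft c 0) = (K : Int) := by
    rw [hpos0]
    by_cases h : K = n
    · simp [h]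
    · have h2 : ¬ ((K : Nat) : Int) = -1 := by omega
      simp [h, h2]
  simp only [← hn, hpos]
  set lst0 : List (Option (String × Int)) := ft.map some ++ [none] with hlst0
  have hlen0 : lst0.length = n + 1 := by simp [hlst0, hn]
  have harg : ((lst0.length : Int) - 1) = ((K + (n - K) : Nat) : Int) := by
    rw [hlen0]; push_cast; omega
  rw [harg]
  set shifted := (PySem.List.pyRange ((K + (n - K) : Nat) : Int) (K : Int) (-1)).foldl
      (fun l i => PySem.List.pySetD l i (PySem.List.pyGetD l (i - 1) none)) lst0 with hsh
  have hshlen : shifted.length = n + 1 := by rw [hsh, shift_fold_length, hlen0]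
  have hshget := shift_fold_getElem? K (n - K) lst0 (by omega)
  rw [PySem.List.pySetD_natCast]
  -- the final Option list is exactly the target list with every element under `some`
  have hlst0get_lt : ∀ m : Nat, m < n → lst0[m]? = Option.map some ft[m]? := by
    intro m hm
    rw [hlst0, List.getElem?_append_left (by simpa [hn] using hm), List.getElem?_map]
  have key : shifted.set K (some (nf, c)) = (ft.take K ++ (nf, c) :: ft.drop K).map some := by
    apply List.ext_getElem?
    intro j
    rw [List.getElem?_map]
    by_cases hjK : j = K
    · subst hjK
      rw [List.getElem?_set_self (by omega),
          List.getElem?_append_right (le_of_eq (by simp; omega))]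
      have hlt : (List.take K ft).length = K := by simp; omega
      rw [hlt, Nat.sub_self, List.getElem?_cons_zero]
      rfl
    · rw [List.getElem?_set_ne (by omega), hshget j]
      by_cases hj1 : j < K
      · rw [if_neg (by omega), hlst0get_lt j (by omega),
            List.getElem?_append_left (by simp; omega)]
        congr 1
        exact (List.getElem?_take_of_lt hj1).symm
      · by_cases hj2 : j ≤ K + (n - K)
        · have hKj : K < j := by omega
          rw [if_pos ⟨hKj, hj2⟩, hlst0get_lt (j - 1) (by omega)]
          have hlt : (List.take K ft).length = K := by simp; omega
          rw [List.getElem?_append_right (by rw [hlt]; omega), hlt]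
          have hjk1 : j - K = (j - K - 1) + 1 := by omega
          rw [hjk1, List.getElem?_cons_succ]
          congr 1
          rw [List.getElem?_drop]
          congr 1
          omega
        · rw [if_neg (by omega)]
          have h1 : lst0[j]? = none := by
            rw [List.getElem?_eq_none_iff]; omega
          have h2 : (ft.take K ++ (nf, c) :: ft.drop K)[j]? = none := by
            rw [List.getElem?_eq_none_iff]; simp; omega
          rw [h1, h2]
          rfl
  rw [key, List.filterMap_map]
  simp

theorem add_friend_spec : Claim_equal_add_friend := by
  intro ft nf c _
  unfold Spec_add_friend
  rw [alt_eq_insertIdx, add_friend_eq_insertIdx]
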